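-- pv_equiv track=rewrite | github.com/mdhdoan/hospital_routing | hospital/python/Graph.py | optimized_route_list
-- ===== SOURCE A (Python) =====
-- def optimized_route_list(complete_route_list):
--     longest_route_list = []
--     longest_route_length = 0
--     for route in complete_route_list:
--         vertex_list, _ = route
--         vertex_list_length = len(vertex_list)
--         if vertex_list_length == longest_route_length:
--             longest_route_list.append(route)
--         if vertex_list_length > longest_route_length:
--             longest_route_length = vertex_list_length
--             longest_route_list = [route]
--
--     if not longest_route_list:
--         return None
--
--     fastest_route_list = []
--     fastest_route_time = None
--     for route in longest_route_list:
--         _, route_time = route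
--         if fastest_route_time is None:
--             fastest_route_time = route_time
--         if route_time == fastest_route_time:
--             fastest_route_list.append(route)
--         if route_time < fastest_route_time:
--             fastest_route_time = route_time
--             fastest_route_list = [route]
--
--     return fastest_route_list
-- ===== SOURCE B (Python) =====
-- def optimized_route_list(complete_route_list):
--     if not complete_route_list:
--         return None
--     max_len = max(len(v) for v, _ in complete_route_list)
--     longest = [r for r in complete_route_list if len(r[0]) == max_len]
--     min_time = min(t for _, t in longest)
--     return [r for r in longest if r[1] == min_time]
-- ===== Notes on version B (the rewrite author's own statement) =====
-- stated objective: simpler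
-- what changed: Replaces A's two single-pass running-best-with-accumulator loops by a compute-extremum-then-filter shape: max()/min() builtins followed by order-preserving list-comprehension filters.
import Mathlib
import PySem

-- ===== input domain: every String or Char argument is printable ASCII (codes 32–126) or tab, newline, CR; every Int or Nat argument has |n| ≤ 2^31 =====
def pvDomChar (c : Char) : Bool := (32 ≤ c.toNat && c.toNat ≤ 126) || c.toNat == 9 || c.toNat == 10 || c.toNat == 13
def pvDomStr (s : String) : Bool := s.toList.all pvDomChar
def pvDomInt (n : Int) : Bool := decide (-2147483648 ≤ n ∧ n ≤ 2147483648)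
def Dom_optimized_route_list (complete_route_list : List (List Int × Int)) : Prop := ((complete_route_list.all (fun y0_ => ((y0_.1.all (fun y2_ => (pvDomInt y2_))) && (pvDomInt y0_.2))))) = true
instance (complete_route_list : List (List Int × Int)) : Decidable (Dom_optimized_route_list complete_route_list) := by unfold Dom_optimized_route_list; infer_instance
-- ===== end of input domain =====

-- B replaces A's two running-best-with-accumulator loops by compute-extremum-then-filter (simpler decomposition).


-- ===== PORT A =====
-- first loop body: keep a running longest length and the list of routes attaining it
def pvStepA (st : List (List Int × Int) × Int) (route : List Int × Int) :
    List (List Int × Int) × Int :=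
  let len : Int := route.1.length
  let acc := if len == st.2 then st.1 ++ [route] else st.1
  if len > st.2 then ([route], len) else (acc, st.2)

-- second loop body: running fastest time (None before the first route) and its routes
def pvStepF (st : List (List Int × Int) × Option Int) (route : List Int × Int) :
    List (List Int × Int) × Option Int :=
  match st.2 with
  | none => (st.1 ++ [route], some route.2)        -- time set to route.2, then == fires
  | some t =>
    if route.2 == t then (st.1 ++ [route], some t)
    else if route.2 < t then ([route], some route.2)
    else (st.1, some t)

def optimized_route_list (complete_route_list : List (List Int × Int)) : Option (List (List Int × Int)) :=
  if (complete_route_list.foldl pvStepA ([], 0)).1 = [] then none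
  else some (((complete_route_list.foldl pvStepA ([], 0)).1).foldl pvStepF ([], none)).1

-- ===== PORT B =====
def optimized_route_list_alt (complete_route_list : List (List Int × Int)) : Option (List (List Int × Int)) :=
  if complete_route_list.isEmpty then none
  else
    match PySem.List.max? (complete_route_list.map (fun r => (r.1.length : Int))) (fun x => x) with
    | none => none   -- unreachable: the list is nonempty
    | some maxLen =>
      let longest := complete_route_list.filter (fun r => (r.1.length : Int) == maxLen)
      match PySem.List.min? (longest.map (fun r => r.2)) (fun x => x) with
      | none => none -- unreachable: longest is nonempty
      | some minT => some (longest.filter (fun r => r.2 == minT))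

-- ===== PRECONDITION & SPEC =====
def Spec_optimized_route_list (complete_route_list : List (List Int × Int)) (out : Option (List (List Int × Int))) : Prop := out = optimized_route_list_alt complete_route_list
instance (complete_route_list : List (List Int × Int)) (out : Option (List (List Int × Int))) : Decidable (Spec_optimized_route_list complete_route_list out) := by unfold Spec_optimized_route_list; infer_instance

-- ===== CLAIM (what is proved, stated in full; the proofs are below) =====
def Claim_equal_optimized_route_list : Prop := ∀ (complete_route_list : List (List Int × Int)), Dom_optimized_route_list complete_route_list → Spec_optimized_route_list complete_route_list (optimized_route_list complete_route_list)

-- ===== LEMMAS AND PROOFS =====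

-- running max of vertex-list lengths, started at m
def pvMaxLen (m : Int) (l : List (List Int × Int)) : Int :=
  l.foldl (fun a r => max a (r.1.length : Int)) m

-- running min of route times, started at t
def pvMinT (t : Int) (l : List (List Int × Int)) : Int :=
  l.foldl (fun a r => min a r.2) t

lemma pvMaxLen_le (m : Int) (l : List (List Int × Int)) : m ≤ pvMaxLen m l := by
  induction l generalizing m with
  | nil => simp [pvMaxLen]
  | cons x t ih =>
      simp only [pvMaxLen, List.foldl_cons] at *
      exact le_trans (le_max_left _ _) (ih _)

lemma pvMaxLen_mem_le (m : Int) (l : List (List Int × Int)) :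
    ∀ r ∈ l, (r.1.length : Int) ≤ pvMaxLen m l := by
  induction l generalizing m with
  | nil => simp
  | cons x t ih =>
      intro r hr
      rcases List.mem_cons.mp hr with h | h
      · subst h
        exact le_trans (le_max_right _ _) (pvMaxLen_le _ _)
      · exact ih _ r h

lemma pvMinT_le (t : Int) (l : List (List Int × Int)) : pvMinT t l ≤ t := by
  induction l generalizing t with
  | nil => simp [pvMinT]
  | cons x u ih =>
      simp only [pvMinT, List.foldl_cons] at *
      exact le_trans (ih _) (min_le_left _ _)

lemma pvMinT_mem_le (t : Int) (l : List (List Int × Int)) :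
    ∀ r ∈ l, pvMinT t l ≤ r.2 := by
  induction l generalizing t with
  | nil => simp
  | cons x u ih =>
      intro r hr
      rcases List.mem_cons.mp hr with h | h
      · subst h
        simp only [pvMinT, List.foldl_cons]
        exact le_trans (pvMinT_le _ _) (min_le_right _ _)
      · exact ih _ r h

-- the running maximum of lengths is attained by some element
lemma pvMaxLen_attained (t : List (List Int × Int)) (a : List Int × Int) :
    ∃ r ∈ a :: t, (r.1.length : Int) = pvMaxLen (a.1.length : Int) t := by
  induction t generalizing a with
  | nil => exact ⟨a, by simp, rfl⟩
  | cons b u ih =>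
      rcases le_total ((a.1.length : Int)) ((b.1.length : Int)) with h | h
      · rcases ih b with ⟨r, hr, hre⟩
        refine ⟨r, ?_, ?_⟩
        · rcases List.mem_cons.mp hr with h' | h' <;> simp [h']
        · rw [hre]; simp [pvMaxLen, max_eq_right h]
      · rcases ih a with ⟨r, hr, hre⟩
        have hswap : pvMaxLen (a.1.length : Int) (b :: u) = pvMaxLen (a.1.length : Int) u := by
          simp [pvMaxLen, max_eq_left h]
        rw [hswap]
        rcases List.mem_cons.mp hr with h' | h'
        · exact ⟨a, by simp, by rw [h'] at hre; exact hre⟩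
        · exact ⟨r, by simp [h'], hre⟩

-- invariant of A's first loop, parametrized by the already-processed prefix p
lemma foldA_inv (l p : List (List Int × Int)) :
    l.foldl pvStepA (p.filter (fun r => (r.1.length : Int) == pvMaxLen 0 p), pvMaxLen 0 p)
      = ((p ++ l).filter (fun r => (r.1.length : Int) == pvMaxLen 0 (p ++ l)), pvMaxLen 0 (p ++ l)) := by
  induction l generalizing p with
  | nil => simp
  | cons x t ih =>
      have hle : ∀ r ∈ p, (r.1.length : Int) ≤ pvMaxLen 0 p := pvMaxLen_mem_le 0 p
      have hstep : pvMaxLen 0 (p ++ [x]) = max (pvMaxLen 0 p) (x.1.length : Int) := by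
        simp [pvMaxLen]
      rcases lt_trichotomy ((x.1.length : Int)) (pvMaxLen 0 p) with hlt | heq | hgt
      · have h1 : pvMaxLen 0 (p ++ [x]) = pvMaxLen 0 p := by
          rw [hstep]; exact max_eq_left (le_of_lt hlt)
        have hb : (((x.1.length : Int)) == pvMaxLen 0 p) = false := by
          simp [ne_of_lt hlt]
        have h2 : (p ++ [x]).filter (fun r => (r.1.length : Int) == pvMaxLen 0 (p ++ [x]))
            = p.filter (fun r => (r.1.length : Int) == pvMaxLen 0 p) := by
          rw [h1, List.filter_append]
          simp [hb]
        have := ih (p ++ [x])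
        rw [h2, h1] at this
        simpa [pvStepA, beq_iff_eq, ne_of_lt hlt, not_lt.mpr (le_of_lt hlt)] using this
      · have h1 : pvMaxLen 0 (p ++ [x]) = pvMaxLen 0 p := by
          rw [hstep]; exact max_eq_left (le_of_eq heq)
        have h2 : (p ++ [x]).filter (fun r => (r.1.length : Int) == pvMaxLen 0 (p ++ [x]))
            = p.filter (fun r => (r.1.length : Int) == pvMaxLen 0 p) ++ [x] := by
          rw [h1, List.filter_append]
          simp [List.filter, heq]
        have := ih (p ++ [x])
        rw [h2, h1] at this
        simpa [pvStepA, beq_iff_eq, heq, lt_irrefl] using this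
      · have h1 : pvMaxLen 0 (p ++ [x]) = (x.1.length : Int) := by
          rw [hstep]; exact max_eq_right (le_of_lt hgt)
        have h2 : (p ++ [x]).filter (fun r => (r.1.length : Int) == pvMaxLen 0 (p ++ [x]))
            = [x] := by
          rw [h1, List.filter_append]
          have hp : p.filter (fun r => (r.1.length : Int) == (x.1.length : Int)) = [] := by
            apply List.filter_eq_nil_iff.mpr
            intro r hr
            simp only [beq_iff_eq]
            exact ne_of_lt (lt_of_le_of_lt (hle r hr) hgt)
          simp [hp, List.filter]
        have := ih (p ++ [x])
        rw [h2, h1] at this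
        simpa [pvStepA, beq_iff_eq, (ne_of_gt hgt), hgt] using this

-- invariant of A's second loop after the first route r0 has been processed
lemma foldF_inv (l : List (List Int × Int)) (r0 : List Int × Int) (p : List (List Int × Int)) :
    l.foldl pvStepF ((r0 :: p).filter (fun r => r.2 == pvMinT r0.2 p), some (pvMinT r0.2 p))
      = ((r0 :: (p ++ l)).filter (fun r => r.2 == pvMinT r0.2 (p ++ l)), some (pvMinT r0.2 (p ++ l))) := by
  induction l generalizing p with
  | nil => simp
  | cons x t ih =>
      have hle : ∀ r ∈ r0 :: p, pvMinT r0.2 p ≤ r.2 := by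
        intro r hr
        rcases List.mem_cons.mp hr with h | h
        · subst h; exact pvMinT_le _ _
        · exact pvMinT_mem_le _ _ r h
      have hstep : pvMinT r0.2 (p ++ [x]) = min (pvMinT r0.2 p) x.2 := by
        simp [pvMinT]
      rcases lt_trichotomy x.2 (pvMinT r0.2 p) with hlt | heq | hgt
      · have h1 : pvMinT r0.2 (p ++ [x]) = x.2 := by
          rw [hstep]; exact min_eq_right (le_of_lt hlt)
        have h2 : (r0 :: (p ++ [x])).filter (fun r => r.2 == pvMinT r0.2 (p ++ [x])) = [x] := by
          rw [h1]
          have : (r0 :: p).filter (fun r => r.2 == x.2) = [] := by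
            apply List.filter_eq_nil_iff.mpr
            intro r hr
            simp only [beq_iff_eq]
            exact ne_of_gt (lt_of_lt_of_le hlt (hle r hr))
          rw [show r0 :: (p ++ [x]) = (r0 :: p) ++ [x] by simp]
          rw [List.filter_append, this]
          simp [List.filter]
        have := ih (p ++ [x])
        rw [h2, h1] at this
        simpa [pvStepF, beq_iff_eq, ne_of_lt hlt, hlt] using this
      · have h1 : pvMinT r0.2 (p ++ [x]) = pvMinT r0.2 p := by
          rw [hstep]; exact min_eq_left (le_of_eq heq.symm)
        have h2 : (r0 :: (p ++ [x])).filter (fun r => r.2 == pvMinT r0.2 (p ++ [x]))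
            = (r0 :: p).filter (fun r => r.2 == pvMinT r0.2 p) ++ [x] := by
          rw [h1, show r0 :: (p ++ [x]) = (r0 :: p) ++ [x] by simp, List.filter_append]
          simp [List.filter, heq]
        have := ih (p ++ [x])
        rw [h2, h1] at this
        simpa [pvStepF, beq_iff_eq, heq] using this
      · have h1 : pvMinT r0.2 (p ++ [x]) = pvMinT r0.2 p := by
          rw [hstep]; exact min_eq_left (le_of_lt hgt)
        have hb : ((x.2) == pvMinT r0.2 p) = false := by
          simp [ne_of_gt hgt]
        have h2 : (r0 :: (p ++ [x])).filter (fun r => r.2 == pvMinT r0.2 (p ++ [x]))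
            = (r0 :: p).filter (fun r => r.2 == pvMinT r0.2 p) := by
          rw [h1, show r0 :: (p ++ [x]) = (r0 :: p) ++ [x] by simp, List.filter_append]
          simp [hb]
        have := ih (p ++ [x])
        rw [h2, h1] at this
        simpa [pvStepF, beq_iff_eq, ne_of_gt hgt, not_lt.mpr (le_of_lt hgt)] using this

-- ===== VERDICT (by name: the statement is the Claim_ definition above) =====
theorem optimized_route_list_spec : Claim_equal_optimized_route_list := by
  intro l _
  unfold Spec_optimized_route_list optimized_route_list optimized_route_list_alt
  cases l with
  | nil => simp
  | cons a t =>
      have hA1 := foldA_inv (a :: t) []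
      have h0 : pvMaxLen 0 ([] : List (List Int × Int)) = 0 := rfl
      simp only [List.filter_nil, List.nil_append, h0] at hA1
      have hmax0 : pvMaxLen 0 (a :: t) = pvMaxLen (a.1.length : Int) t := by
        simp [pvMaxLen]
      have hmaxB : PySem.List.max? ((a :: t).map (fun r => (r.1.length : Int))) (fun x => x)
          = some (pvMaxLen 0 (a :: t)) := by
        rw [List.map_cons, PySem.List.max?_id_cons, List.foldl_map, hmax0, pvMaxLen]
      -- the filter of longest routes is nonempty
      have hne : (a :: t).filter (fun r => (r.1.length : Int) == pvMaxLen 0 (a :: t)) ≠ [] := by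
        rcases pvMaxLen_attained t a with ⟨r, hr, hre⟩
        rw [← hmax0] at hre
        have : r ∈ (a :: t).filter (fun r => (r.1.length : Int) == pvMaxLen 0 (a :: t)) :=
          List.mem_filter.mpr ⟨hr, by simp [hre]⟩
        intro h; rw [h] at this; simp at this
      rw [hA1]
      simp only [if_neg hne, List.isEmpty_cons, Bool.false_eq_true, if_false, hmaxB]
      rcases List.exists_cons_of_ne_nil hne with ⟨r0, q, hq⟩
      have hminB : PySem.List.min?
          (((a :: t).filter (fun r => (r.1.length : Int) == pvMaxLen 0 (a :: t))).map (fun r => r.2))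
          (fun x => x) = some (pvMinT r0.2 q) := by
        rw [hq, List.map_cons, PySem.List.min?_id_cons, List.foldl_map, pvMinT]
      have hF' : q.foldl pvStepF ([r0], some r0.2)
          = ((r0 :: q).filter (fun r => r.2 == pvMinT r0.2 q), some (pvMinT r0.2 q)) := by
        have := foldF_inv q r0 []
        simpa [pvMinT] using this
      have hstep0 : pvStepF ([], none) r0 = ([r0], some r0.2) := by
        simp [pvStepF]
      rw [hminB, hq]
      simp only [List.foldl_cons, hstep0, hF']
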